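-- pv_equiv track=rewrite | github.com/Rejean-McCormick/abstract-wiki-architect | app/adapters/persistence/lexicon/aw_lexeme_bridge.py | _feature_key_from_mapping
-- ===== SOURCE A (Python) =====
-- from collections.abc import Iterable, Mapping
-- from typing import Any, Dict, List, Optional, Tuple
--
-- def _safe_str(value: Any, default: str = "") -> str:
--     if value is None:
--         return default
--     if isinstance(value, str):
--         return value
--     return str(value)
--
-- def _feature_key_from_mapping(features: Mapping[str, Any]) -> str:
--     """
--     Turn a free-form feature mapping into a stable, readable form key.
--
--     Preferred layout:
--       gender.number.case.person.tense.mood.aspect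
--     plus any remaining keys as k=v segments.
--     """
--     if not features:
--         return ""
--
--     ordered_parts: List[str] = []
--     consumed: set[str] = set()
--
--     for key in ("gender", "number", "case", "person", "tense", "mood", "aspect"):
--         if key in features and features[key] not in (None, "", False):
--             ordered_parts.append(_safe_str(features[key]).strip())
--             consumed.add(key)
--
--     for key in sorted(features.keys()):
--         if key in consumed:
--             continue
--         value = features[key]
--         if value in (None, "", False):
--             continue
--         if value is True:
--             ordered_parts.append(str(key).strip())
--         else:
--             ordered_parts.append(f"{key}={_safe_str(value).strip()}")
--
--     return ".".join(part for part in ordered_parts if part)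
-- ===== SOURCE B (Python) =====
-- from typing import Any, Mapping
--
-- _PREF = ("gender", "number", "case", "person", "tense", "mood", "aspect")
--
--
-- def _safe_str(value: Any, default: str = "") -> str:
--     if value is None:
--         return default
--     if isinstance(value, str):
--         return value
--     return str(value)
--
--
-- def _prio(key: Any) -> int:
--     return _PREF.index(key) if key in _PREF else 7
--
--
-- def _feature_key_from_mapping(features: Mapping[str, Any]) -> str:
--     parts = []
--     for key in sorted(features.keys(), key=lambda k: (_prio(k), k)):
--         value = features[key]
--         if value in (None, "", False):
--             continue
--         if _prio(key) < 7:
--             part = _safe_str(value).strip()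
--         elif value is True:
--             part = str(key).strip()
--         else:
--             part = f"{key}={_safe_str(value).strip()}"
--         if part:
--             parts.append(part)
--     return ".".join(parts)
-- ===== Notes on version B (the rewrite author's own statement) =====
-- stated objective: alternative
-- what changed: Replaces A's two-phase construction (fixed preferred-key loop building a consumed set, then a second loop over the sorted remaining keys) with a single sort of all keys by a (priority, key) tuple and one unified pass that picks the format per key, filtering empty parts at emission instead of at the final join.
import Mathlib
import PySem

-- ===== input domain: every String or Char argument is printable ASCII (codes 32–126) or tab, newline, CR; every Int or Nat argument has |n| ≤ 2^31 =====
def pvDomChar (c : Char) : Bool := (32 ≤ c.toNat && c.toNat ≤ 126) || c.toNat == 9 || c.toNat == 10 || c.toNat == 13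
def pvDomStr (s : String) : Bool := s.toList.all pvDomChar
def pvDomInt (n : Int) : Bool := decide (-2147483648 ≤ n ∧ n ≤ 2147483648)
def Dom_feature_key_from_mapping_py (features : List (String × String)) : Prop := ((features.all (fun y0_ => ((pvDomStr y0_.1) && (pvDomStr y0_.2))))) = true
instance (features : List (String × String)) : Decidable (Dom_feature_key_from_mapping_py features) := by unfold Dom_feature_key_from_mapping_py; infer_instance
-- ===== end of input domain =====

-- B replaces A's two-phase build (fixed preferred-key loop + sorted-remainder loop) by one sort of
-- all keys under a (priority, key) tuple and a single unified emission pass (alternative, same cost).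


-- ===== PORT A =====
def pvPrefKeys : List String := ["gender", "number", "case", "person", "tense", "mood", "aspect"]

-- dict lookup (first match; Pre_ keeps the key list duplicate-free, so this is Python's dict lookup)
def pvLookup (features : List (String × String)) (key : String) : Option String :=
  (features.find? (fun p => p.1 == key)).map Prod.snd

def feature_key_from_mapping_py (features : List (String × String)) : String :=
  if features = [] then ""
  else
    -- first loop: ordered_parts / consumed over the fixed preferred keys
    let st := pvPrefKeys.foldl (fun (st : List String × PySem.Set String) key =>
        match pvLookup features key with
        | some v =>
          -- 'features[key] not in (None, "", False)': for a str value exactly v ≠ ""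
          if v ≠ "" then (st.1 ++ [PySem.Str.strip v], PySem.Set.add st.2 key) else st
        | none => st) ([], PySem.Set.empty)
    -- second loop: sorted remaining keys as k=v segments
    let parts := (PySem.List.sorted (features.map Prod.fst) (fun k => k) false).foldl
      (fun acc key =>
        if PySem.Set.contains st.2 key then acc
        else match pvLookup features key with
          | some v =>
            if v = "" then acc  -- 'value in (None, "", False)'
            else acc ++ [PySem.Str.join "" [key, "=", PySem.Str.strip v]]  -- 'value is True' never holds for a str value
          | none => acc) st.1
    PySem.Str.join "." (parts.filter (fun p => p ≠ ""))

-- ===== PORT B =====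
def pvPrioB (key : String) : Int :=
  match PySem.List.index? pvPrefKeys key with
  | some i => (i : Int)
  | none => 7

def feature_key_from_mapping_py_alt (features : List (String × String)) : String :=
  let parts := (PySem.List.sorted2 (features.map Prod.fst) pvPrioB (fun k => k) false).foldl
    (fun acc key =>
      match pvLookup features key with
      | some v =>
        if v = "" then acc  -- 'value in (None, "", False)'
        else
          -- 'value is True' never holds for a str value
          let part := if pvPrioB key < 7 then PySem.Str.strip v
                      else PySem.Str.join "" [key, "=", PySem.Str.strip v]
          if part ≠ "" then acc ++ [part] else acc
      | none => acc) []
  PySem.Str.join "." parts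

-- ===== PRECONDITION & SPEC =====
-- Pre_ excludes lists with duplicate keys: they cannot arise from A's Python dict argument
-- (a dict literal collapses duplicates), and which value a duplicate-key association list denotes is accidental.
def Pre_feature_key_from_mapping_py (features : List (String × String)) : Prop :=
  (features.map Prod.fst).Nodup
instance (features : List (String × String)) : Decidable (Pre_feature_key_from_mapping_py features) := by unfold Pre_feature_key_from_mapping_py; infer_instance

def pvWitness_feature_key_from_mapping_py : (List (String × String)) :=
  [("gender", " m "), ("zz", "1"), ("case", "")]

def Spec_feature_key_from_mapping_py (features : List (String × String)) (out : String) : Prop := out = feature_key_from_mapping_py_alt features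
instance (features : List (String × String)) (out : String) : Decidable (Spec_feature_key_from_mapping_py features out) := by unfold Spec_feature_key_from_mapping_py; infer_instance

-- ===== CLAIM (what is proved, stated in full; the proofs are below) =====
def Claim_equal_feature_key_from_mapping_py : Prop := ∀ (features : List (String × String)), Dom_feature_key_from_mapping_py features → Pre_feature_key_from_mapping_py features → Spec_feature_key_from_mapping_py features (feature_key_from_mapping_py features)

-- ===== LEMMAS AND PROOFS =====

def pvLexKey (k : String) : Lex (Int × String) := toLex ((pvPrioB k, k) : Int × String)

theorem pv_sorted2_eq_sorted_lex (xs : List String) :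
    PySem.List.sorted2 xs pvPrioB (fun k => k) false = PySem.List.sorted xs pvLexKey false := by
  unfold PySem.List.sorted2 PySem.List.sorted
  simp only [Bool.false_eq_true, if_false]
  congr 1
  funext acc x
  congr 1
  funext a b
  have : (toLex ((pvPrioB a, a) : Int × String) < toLex ((pvPrioB b, b) : Int × String)) ↔
      (pvPrioB a < pvPrioB b ∨ (¬ pvPrioB b < pvPrioB a ∧ a < b)) := by
    rw [Prod.Lex.lt_iff]
    simp only [ofLex_toLex]
    constructor
    · rintro (h | ⟨h1, h2⟩)
      · exact Or.inl h
      · exact Or.inr ⟨by omega, h2⟩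
    · rintro (h | ⟨h1, h2⟩)
      · exact Or.inl h
      · rcases lt_trichotomy (pvPrioB a) (pvPrioB b) with h' | h' | h'
        · exact Or.inl h'
        · exact Or.inr ⟨h', h2⟩
        · exact absurd h' h1
  simp only [pvLexKey]
  rw [Bool.eq_iff_iff]
  simp only [Bool.or_eq_true, Bool.and_eq_true, decide_eq_true_eq,
    Bool.not_eq_true', decide_eq_false_iff_not]
  exact this.symm


theorem pv_prio_lt {a : String} (h : a ∈ pvPrefKeys) : pvPrioB a < 7 := by
  fin_cases h <;> decide

theorem pv_prio_seven {a : String} (h : a ∉ pvPrefKeys) : pvPrioB a = 7 := by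
  unfold pvPrioB
  rw [(PySem.List.index?_eq_none_iff pvPrefKeys a).mpr h]

theorem pv_pref_prio_pairwise : pvPrefKeys.Pairwise (fun a b => pvPrioB a < pvPrioB b) := by
  decide

theorem pv_lookup_isSome {features : List (String × String)} {k : String}
    (h : k ∈ features.map Prod.fst) : ∃ v, pvLookup features k = some v := by
  simp only [List.mem_map] at h
  obtain ⟨p, hp, hk⟩ := h
  have : (features.find? (fun p => p.1 == k)).isSome := by
    rw [List.find?_isSome]
    exact ⟨p, hp, by simp [hk]⟩
  obtain ⟨q, hq⟩ := Option.isSome_iff_exists.mp this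
  exact ⟨q.2, by simp [pvLookup, hq]⟩

-- the split of the lex-sorted key list
theorem pv_split (keys : List String) (hnd : keys.Nodup) :
    PySem.List.sorted keys pvLexKey false =
      pvPrefKeys.filter (fun k => decide (k ∈ keys)) ++
      PySem.List.sorted (keys.filter (fun k => !decide (k ∈ pvPrefKeys))) (fun k => k) false := by
  apply PySem.List.sorted_eq_of_perm_of_pairwise_lt
  · -- permutation
    have h1 : (pvPrefKeys.filter (fun k => decide (k ∈ keys))).Perm
        (keys.filter (fun k => decide (k ∈ pvPrefKeys))) := by
      apply (List.perm_ext_iff_of_nodup ((by decide : pvPrefKeys.Nodup).filter _) (hnd.filter _)).mpr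
      intro a; simp [List.mem_filter, and_comm]
    have h2 : (PySem.List.sorted (keys.filter (fun k => !decide (k ∈ pvPrefKeys))) (fun k => k) false).Perm
        (keys.filter (fun k => !decide (k ∈ pvPrefKeys))) := PySem.List.sorted_perm _ _ _
    exact (List.Perm.append h1 h2).trans (List.filter_append_perm _ _)
  · -- pairwise strict under pvLexKey
    have hlex : ∀ a b : String, (pvPrioB a < pvPrioB b ∨ (pvPrioB a = pvPrioB b ∧ a < b)) →
        pvLexKey a < pvLexKey b := by
      intro a b h
      rw [pvLexKey, pvLexKey, Prod.Lex.lt_iff]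
      simpa using h
    rw [List.pairwise_append]
    refine ⟨?_, ?_, ?_⟩
    · exact (pv_pref_prio_pairwise.filter _).imp (fun h => hlex _ _ (Or.inl h))
    · have hno : (keys.filter (fun k => !decide (k ∈ pvPrefKeys))).Nodup := hnd.filter _
      have hsn : (PySem.List.sorted (keys.filter (fun k => !decide (k ∈ pvPrefKeys))) (fun k => k) false).Nodup :=
        (PySem.List.sorted_perm _ _ _).symm.nodup hno
      have hle := PySem.List.sorted_pairwise (keys.filter (fun k => !decide (k ∈ pvPrefKeys))) (fun k => k)
      refine ((hle.and hsn).imp_of_mem ?_)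
      intro a b ha hb h
      have ha7 : pvPrioB a = 7 := pv_prio_seven (by
        have := (PySem.List.mem_sorted _ _ _ _).mp ha
        simp only [List.mem_filter, Bool.not_eq_true', decide_eq_false_iff_not] at this
        exact this.2)
      have hb7 : pvPrioB b = 7 := pv_prio_seven (by
        have := (PySem.List.mem_sorted _ _ _ _).mp hb
        simp only [List.mem_filter, Bool.not_eq_true', decide_eq_false_iff_not] at this
        exact this.2)
      exact hlex _ _ (Or.inr ⟨by rw [ha7, hb7], lt_of_le_of_ne h.1 h.2⟩)
    · intro a ha b hb
      have ha' : a ∈ pvPrefKeys := (List.mem_filter.mp ha).1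
      have hb' : pvPrioB b = 7 := pv_prio_seven (by
        have := (PySem.List.mem_sorted _ _ _ _).mp hb
        simp only [List.mem_filter, Bool.not_eq_true', decide_eq_false_iff_not] at this
        exact this.2)
      exact hlex _ _ (Or.inl (by rw [hb']; exact pv_prio_lt ha'))

def pvGA1 (features : List (String × String)) (k : String) : List String :=
  match pvLookup features k with
  | some v => if v ≠ "" then [PySem.Str.strip v] else []
  | none => []

def pvAddC (features : List (String × String)) (c : PySem.Set String) (k : String) : PySem.Set String :=
  match pvLookup features k with
  | some v => if v ≠ "" then PySem.Set.add c k else c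
  | none => c

def pvGA2 (features : List (String × String)) (c : PySem.Set String) (k : String) : List String :=
  if PySem.Set.contains c k then []
  else match pvLookup features k with
    | some v => if v = "" then [] else [PySem.Str.join "" [k, "=", PySem.Str.strip v]]
    | none => []

def pvGB (features : List (String × String)) (k : String) : List String :=
  match pvLookup features k with
  | some v =>
    if v = "" then []
    else
      let part := if pvPrioB k < 7 then PySem.Str.strip v
                  else PySem.Str.join "" [k, "=", PySem.Str.strip v]
      if part ≠ "" then [part] else []
  | none => []

theorem pv_foldlA1 (features : List (String × String)) (ks : List String)
    (st : List String × PySem.Set String) :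
    ks.foldl (fun (st : List String × PySem.Set String) key =>
      match pvLookup features key with
      | some v => if v ≠ "" then (st.1 ++ [PySem.Str.strip v], PySem.Set.add st.2 key) else st
      | none => st) st
    = (st.1 ++ ks.flatMap (pvGA1 features), ks.foldl (pvAddC features) st.2) := by
  induction ks generalizing st with
  | nil => simp
  | cons k ks ih =>
    simp only [List.foldl_cons, List.flatMap_cons]
    rw [ih]
    cases h : pvLookup features k with
    | none => simp [pvGA1, pvAddC, h]
    | some v =>
      by_cases hv : v = "" <;> simp [pvGA1, pvAddC, h, hv]

theorem pv_mem_addC (features : List (String × String)) (ks : List String)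
    (c0 : PySem.Set String) (x : String) :
    x ∈ ks.foldl (pvAddC features) c0 ↔
      x ∈ c0 ∨ (x ∈ ks ∧ ∃ v, pvLookup features x = some v ∧ v ≠ "") := by
  induction ks generalizing c0 with
  | nil => simp
  | cons k ks ih =>
    have hstep : x ∈ pvAddC features c0 k ↔
        x ∈ c0 ∨ (x = k ∧ ∃ v, pvLookup features k = some v ∧ v ≠ "") := by
      unfold pvAddC
      cases h : pvLookup features k with
      | none => simp
      | some v =>
        by_cases hv : v = ""
        · subst hv; simp
        · simp [PySem.Set.mem_add, hv]
    rw [List.foldl_cons, ih, hstep]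
    simp only [List.mem_cons]
    constructor
    · rintro ((h' | ⟨rfl, hv⟩) | ⟨hks, hv⟩)
      · exact Or.inl h'
      · exact Or.inr ⟨Or.inl rfl, hv⟩
      · exact Or.inr ⟨Or.inr hks, hv⟩
    · rintro (h' | ⟨(rfl | hks), hv⟩)
      · exact Or.inl (Or.inl h')
      · exact Or.inl (Or.inr ⟨rfl, hv⟩)
      · exact Or.inr ⟨hks, hv⟩

theorem pv_foldlA2 (features : List (String × String)) (c : PySem.Set String)
    (l : List String) (acc : List String) :
    l.foldl (fun acc key =>
      if PySem.Set.contains c key then acc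
      else match pvLookup features key with
        | some v =>
          if v = "" then acc
          else acc ++ [PySem.Str.join "" [key, "=", PySem.Str.strip v]]
        | none => acc) acc
    = acc ++ l.flatMap (pvGA2 features c) := by
  induction l generalizing acc with
  | nil => simp
  | cons k l ih =>
    simp only [List.foldl_cons, List.flatMap_cons]
    rw [ih]
    by_cases hc : k ∈ c
    · simp [pvGA2, hc]
    · cases h : pvLookup features k with
      | none => simp [pvGA2, hc, h]
      | some v => by_cases hv : v = "" <;> simp [pvGA2, hc, h, hv]

theorem pv_foldlB (features : List (String × String)) (l : List String) (acc : List String) :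
    l.foldl (fun acc key =>
      match pvLookup features key with
      | some v =>
        if v = "" then acc
        else
          let part := if pvPrioB key < 7 then PySem.Str.strip v
                      else PySem.Str.join "" [key, "=", PySem.Str.strip v]
          if part ≠ "" then acc ++ [part] else acc
      | none => acc) acc
    = acc ++ l.flatMap (pvGB features) := by
  induction l generalizing acc with
  | nil => simp
  | cons k l ih =>
    simp only [List.foldl_cons, List.flatMap_cons]
    rw [ih]
    cases h : pvLookup features k with
    | none => simp [pvGB, h]
    | some v =>
      by_cases hv : v = ""
      · simp [pvGB, h, hv]
      · by_cases hp : (if pvPrioB k < 7 then PySem.Str.strip v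
            else PySem.Str.join "" [k, "=", PySem.Str.strip v]) = "" <;>
          simp [pvGB, h, hv, hp]

theorem pv_flatMap_filter {α β : Type} (l : List α) (p : α → Bool) (g : α → List β)
    (h : ∀ k ∈ l, p k = false → g k = []) :
    l.flatMap g = (l.filter p).flatMap g := by
  induction l with
  | nil => simp
  | cons k l ih =>
    simp only [List.flatMap_cons, List.filter_cons]
    cases hp : p k
    · rw [h k (by simp) hp, ih (fun k hk => h k (by simp [hk]))]; simp
    · rw [if_pos rfl, List.flatMap_cons, ih (fun k hk => h k (by simp [hk]))]

theorem pv_sorted_filter (l : List String) (p : String → Bool) (hnd : l.Nodup) :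
    (PySem.List.sorted l (fun k => k) false).filter p
      = PySem.List.sorted (l.filter p) (fun k => k) false := by
  symm
  apply PySem.List.sorted_eq_of_perm_of_pairwise_lt
  · exact (PySem.List.sorted_perm l (fun k => k) false).filter p
  · have hsn : (PySem.List.sorted l (fun k => k) false).Nodup :=
      (PySem.List.sorted_perm _ _ _).symm.nodup hnd
    have hle := PySem.List.sorted_pairwise l (fun k => k)
    exact ((hle.and hsn).imp (fun h => lt_of_le_of_ne h.1 h.2)).filter p

theorem pv_lookup_none {features : List (String × String)} {k : String}
    (h : k ∉ features.map Prod.fst) : pvLookup features k = none := by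
  unfold pvLookup
  rw [List.find?_eq_none.mpr]
  · rfl
  · intro p hp
    simp only [beq_iff_eq]
    intro hk
    exact h (List.mem_map.mpr ⟨p, hp, hk⟩)

theorem pv_main (features : List (String × String))
    (hnd : (features.map Prod.fst).Nodup) :
    feature_key_from_mapping_py features = feature_key_from_mapping_py_alt features := by
  unfold feature_key_from_mapping_py feature_key_from_mapping_py_alt
  by_cases hf : features = []
  · subst hf; rfl
  · rw [if_neg hf]
    simp only [pv_foldlA1, pv_foldlB, pv_sorted2_eq_sorted_lex]
    rw [pv_foldlA2, pv_split _ hnd, List.flatMap_append]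
    simp only [List.nil_append, List.filter_append, List.filter_flatMap]
    congr 1
    congr 1
    · -- preferred block
      rw [pv_flatMap_filter pvPrefKeys (fun k => decide (k ∈ features.map Prod.fst))]
      · apply List.flatMap_congr
        intro k hk
        rw [List.mem_filter, decide_eq_true_eq] at hk
        obtain ⟨v, hv⟩ := pv_lookup_isSome hk.2
        have hp := pv_prio_lt hk.1
        unfold pvGA1 pvGB
        rw [hv]
        by_cases hv0 : v = ""
        · simp [hv0]
        · simp only [if_pos (by simpa using hv0), if_neg (by simpa using hv0), if_pos hp]
          by_cases hs : PySem.Str.strip v = "" <;> simp [hs]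
      · intro k _ hk
        rw [decide_eq_false_iff_not] at hk
        unfold pvGA1
        rw [pv_lookup_none hk]
        rfl
    · -- remaining block
      rw [pv_flatMap_filter _ (fun k => !decide (k ∈ pvPrefKeys)), pv_sorted_filter _ _ hnd]
      · apply List.flatMap_congr
        intro k hk
        have hk' := (PySem.List.mem_sorted _ _ _ _).mp hk
        rw [List.mem_filter, Bool.not_eq_eq_eq_not, Bool.not_true, decide_eq_false_iff_not] at hk'
        obtain ⟨v, hv⟩ := pv_lookup_isSome hk'.1
        have h7 := pv_prio_seven hk'.2
        have hnc : PySem.Set.contains (pvPrefKeys.foldl (pvAddC features) PySem.Set.empty) k = false := by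
          rw [Bool.eq_false_iff]
          intro hc
          have := (pv_mem_addC features pvPrefKeys PySem.Set.empty k).mp
            ((PySem.Set.contains_iff _ _).mp hc)
          rcases this with h' | h'
          · simp [PySem.Set.empty] at h'
          · exact hk'.2 h'.1
        unfold pvGA2 pvGB
        rw [hnc, hv]
        by_cases hv0 : v = ""
        · simp [hv0]
        · simp only [Bool.false_eq_true, if_false,
            if_neg (by simpa using hv0), h7, if_neg (by omega : ¬ (7:Int) < 7)]
          by_cases hs : PySem.Str.join "" [k, "=", PySem.Str.strip v] = "" <;> simp [hs]
      · intro k hk hk'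
        rw [Bool.not_eq_eq_eq_not, Bool.not_false, decide_eq_true_eq] at hk'
        have hkk := (PySem.List.mem_sorted _ _ _ _).mp hk
        obtain ⟨v, hv⟩ := pv_lookup_isSome hkk
        unfold pvGA2
        by_cases hv0 : v = ""
        · by_cases hc : PySem.Set.contains (pvPrefKeys.foldl (pvAddC features) PySem.Set.empty) k = true
          · rw [if_pos hc]; rfl
          · rw [if_neg hc, hv]; simp [hv0]
        · have hc : PySem.Set.contains (pvPrefKeys.foldl (pvAddC features) PySem.Set.empty) k = true := by
            rw [PySem.Set.contains_iff, pv_mem_addC]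
            exact Or.inr ⟨hk', v, hv, hv0⟩
          rw [if_pos hc]; rfl

-- ===== VERDICT (by name: the statement is the Claim_ definition above) =====
theorem feature_key_from_mapping_py_spec : Claim_equal_feature_key_from_mapping_py := by
  intro features _ hnd
  unfold Spec_feature_key_from_mapping_py
  exact pv_main features hnd
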